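-- pv_equiv track=rewrite | github.com/Bidulusha/5ace | pkinter/newmath.py | to_time
-- ===== SOURCE A (Python) =====
-- def to_time(mas):
--     timemas = [31557600000000, 86400000000, 3600000000, 60000000, 1000000]
--     datemas = []
--
--     for i in mas:
--         t = int(i[0])
--         date = []
--         for j in timemas:
--             date.append(t // j)
--             t %= j
--         datemas.append(date)
--     return datemas
-- ===== SOURCE B (Python) =====
-- def to_time(mas):
--     def fields(t):
--         r = t % 31557600000000
--         return [t // 31557600000000,
--                 r // 86400000000,
--                 (r // 3600000000) % 24,
--                 (r // 60000000) % 60,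
--                 (r // 1000000) % 60]
--     return [fields(int(i[0])) for i in mas]
-- ===== Notes on version B (the rewrite author's own statement) =====
-- stated objective: alternative
-- what changed: Replaces the accumulator loop that threads a mutable remainder through the divisor table with per-field closed-form arithmetic: after one remainder r = t % year, each field is computed independently as r // divisor % ratio.
-- outside the precondition, e.g. on to_time([()]): A raises IndexError, B raises IndexError
import Mathlib
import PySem

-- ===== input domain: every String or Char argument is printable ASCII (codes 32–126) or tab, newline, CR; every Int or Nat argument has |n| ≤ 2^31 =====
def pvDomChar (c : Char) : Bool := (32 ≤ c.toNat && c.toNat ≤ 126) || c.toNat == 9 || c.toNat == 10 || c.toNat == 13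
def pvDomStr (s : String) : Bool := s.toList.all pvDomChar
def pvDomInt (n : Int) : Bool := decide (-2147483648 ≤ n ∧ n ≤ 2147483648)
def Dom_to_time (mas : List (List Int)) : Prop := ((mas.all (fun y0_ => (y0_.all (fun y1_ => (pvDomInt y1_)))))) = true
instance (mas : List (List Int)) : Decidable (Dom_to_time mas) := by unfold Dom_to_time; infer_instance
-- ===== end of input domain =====

-- B replaces A's mutable-remainder loop over the divisor table by independent
-- closed-form fields (alternative decomposition, same cost).

-- ===== PORT A =====
def to_time (mas : List (List Int)) : List (List Int) :=
  let timemas : List Int := [31557600000000, 86400000000, 3600000000, 60000000, 1000000]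
  mas.foldl (fun datemas i =>
    -- i[0]; Pre_to_time excludes i = [], where Python raises IndexError
    let t := (PySem.List.pyGet? i 0).getD 0
    let s := timemas.foldl (fun (s : Int × List Int) j =>
        (PySem.Int.mod s.1 j, s.2 ++ [PySem.Int.floordiv s.1 j])) (t, [])
    datemas ++ [s.2]) []

-- ===== PORT B =====
def to_time_alt_fields (t : Int) : List Int :=
  let r := PySem.Int.mod t 31557600000000
  [PySem.Int.floordiv t 31557600000000,
   PySem.Int.floordiv r 86400000000,
   PySem.Int.mod (PySem.Int.floordiv r 3600000000) 24,
   PySem.Int.mod (PySem.Int.floordiv r 60000000) 60,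
   PySem.Int.mod (PySem.Int.floordiv r 1000000) 60]

def to_time_alt (mas : List (List Int)) : List (List Int) :=
  mas.map (fun i => to_time_alt_fields ((PySem.List.pyGet? i 0).getD 0))

-- ===== PRECONDITION & SPEC =====
-- Pre_ excludes inner lists that are empty: there both A and B raise IndexError on i[0].
def Pre_to_time (mas : List (List Int)) : Prop := ∀ i ∈ mas, i ≠ []
instance (mas : List (List Int)) : Decidable (Pre_to_time mas) := by unfold Pre_to_time; infer_instance
def pvWitness_to_time : List (List Int) := [[123456789], [-7], [0, 3]]

def Spec_to_time (mas : List (List Int)) (out : List (List Int)) : Prop := out = to_time_alt mas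
instance (mas : List (List Int)) (out : List (List Int)) : Decidable (Spec_to_time mas out) := by unfold Spec_to_time; infer_instance

-- ===== CLAIM (what is proved, stated in full; the proofs are below) =====
def Claim_equal_to_time : Prop := ∀ (mas : List (List Int)), Dom_to_time mas → Pre_to_time mas → Spec_to_time mas (to_time mas)

-- ===== LEMMAS AND PROOFS =====

-- one element: A's remainder-threading fold over the five divisors equals B's closed-form fields
lemma fields_eq (t : Int) :
    ([(31557600000000 : Int), 86400000000, 3600000000, 60000000, 1000000].foldl
      (fun (s : Int × List Int) j =>
        (PySem.Int.mod s.1 j, s.2 ++ [PySem.Int.floordiv s.1 j])) (t, [])).2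
    = to_time_alt_fields t := by
  simp only [List.foldl, to_time_alt_fields, List.nil_append, List.cons_append]
  have hm31557600000000 : ∀ a : Int, PySem.Int.mod a 31557600000000 = a % 31557600000000 := fun a => PySem.Int.mod_eq_emod_of_pos (by norm_num)
  have hm86400000000 : ∀ a : Int, PySem.Int.mod a 86400000000 = a % 86400000000 := fun a => PySem.Int.mod_eq_emod_of_pos (by norm_num)
  have hm3600000000 : ∀ a : Int, PySem.Int.mod a 3600000000 = a % 3600000000 := fun a => PySem.Int.mod_eq_emod_of_pos (by norm_num)
  have hm60000000 : ∀ a : Int, PySem.Int.mod a 60000000 = a % 60000000 := fun a => PySem.Int.mod_eq_emod_of_pos (by norm_num)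
  have hm24 : ∀ a : Int, PySem.Int.mod a 24 = a % 24 := fun a => PySem.Int.mod_eq_emod_of_pos (by norm_num)
  have hm60 : ∀ a : Int, PySem.Int.mod a 60 = a % 60 := fun a => PySem.Int.mod_eq_emod_of_pos (by norm_num)
  have hd31557600000000 : ∀ a : Int, PySem.Int.floordiv a 31557600000000 = a / 31557600000000 := fun a => PySem.Int.floordiv_eq_ediv_of_pos (by norm_num)
  have hd86400000000 : ∀ a : Int, PySem.Int.floordiv a 86400000000 = a / 86400000000 := fun a => PySem.Int.floordiv_eq_ediv_of_pos (by norm_num)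
  have hd3600000000 : ∀ a : Int, PySem.Int.floordiv a 3600000000 = a / 3600000000 := fun a => PySem.Int.floordiv_eq_ediv_of_pos (by norm_num)
  have hd60000000 : ∀ a : Int, PySem.Int.floordiv a 60000000 = a / 60000000 := fun a => PySem.Int.floordiv_eq_ediv_of_pos (by norm_num)
  have hd1000000 : ∀ a : Int, PySem.Int.floordiv a 1000000 = a / 1000000 := fun a => PySem.Int.floordiv_eq_ediv_of_pos (by norm_num)
  simp only [hm31557600000000, hm86400000000, hm3600000000, hm60000000, hm24, hm60, hd31557600000000, hd86400000000, hd3600000000, hd60000000, hd1000000]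
  generalize (t % 31557600000000 : Int) = r
  refine congrArg₂ List.cons rfl (congrArg₂ List.cons rfl (congrArg₂ List.cons ?_
    (congrArg₂ List.cons ?_ (congrArg₂ List.cons ?_ rfl)))) <;> omega

-- ===== VERDICT (by name: the statement is the Claim_ definition above) =====
theorem to_time_spec : Claim_equal_to_time := by
  intro mas _ _
  show to_time mas = to_time_alt mas
  unfold to_time to_time_alt
  rw [PySem.List.foldl_append_singleton_eq_map]
  exact List.map_congr_left (fun i _ => fields_eq _)
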